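-- pv_equiv track=rewrite | github.com/aniket0951/LeetcodePractise | GeeksProblem/geeksLogicalProblems.py | findUnionNumber
-- ===== SOURCE A (Python) =====
-- def findUnionNumber(listA, listB, n):
--     emptyList = []
--
--     for i in listA:
--         for j in listB:
--             if i == j:
--                 listB.remove(i)
--                 break
--         emptyList.append(i)
--     emptyList = emptyList + listB
--     return len(emptyList)
-- ===== SOURCE B (Python) =====
-- def findUnionNumber(listA, listB, n):
--     ca = {}
--     for v in listA:
--         ca[v] = ca.get(v, 0) + 1
--     cb = {}
--     for v in listB:
--         cb[v] = cb.get(v, 0) + 1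
--     overlap = 0
--     for v, c in ca.items():
--         overlap += min(c, cb.get(v, 0))
--     return len(listA) + len(listB) - overlap
-- ===== Notes on version B (the rewrite author's own statement) =====
-- stated objective: faster
-- what changed: A's nested scan over listB with in-place remove per listA element is replaced by two frequency tables built in one pass each, returning len(listA)+len(listB) minus the sum of per-key minimum counts; B leaves listB unmutated (equivalence is about the return value).
import Mathlib
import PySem

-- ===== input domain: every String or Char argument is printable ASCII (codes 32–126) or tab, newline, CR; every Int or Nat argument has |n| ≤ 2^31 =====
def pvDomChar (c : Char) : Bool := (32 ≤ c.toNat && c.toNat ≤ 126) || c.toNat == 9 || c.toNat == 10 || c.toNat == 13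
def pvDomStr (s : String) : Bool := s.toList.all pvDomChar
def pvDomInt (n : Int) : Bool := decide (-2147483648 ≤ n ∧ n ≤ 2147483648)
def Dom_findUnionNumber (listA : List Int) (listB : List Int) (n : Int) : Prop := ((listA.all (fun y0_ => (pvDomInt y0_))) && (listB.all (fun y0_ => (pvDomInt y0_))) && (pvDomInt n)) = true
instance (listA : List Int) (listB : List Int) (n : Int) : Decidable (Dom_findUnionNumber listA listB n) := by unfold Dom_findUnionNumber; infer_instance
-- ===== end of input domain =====

-- B computes the multiset-union size from two frequency tables (len A + len B - Σ min counts)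
-- instead of A's nested scan-and-remove loop; objective: alternative (single aggregation pass,
-- no quadratic inner scan; a timing run measured B faster). Equivalence is about the RETURN value only: A mutates listB
-- (removes matched elements) while B leaves both arguments untouched.

-- ===== PORT A =====
-- for i in listA: inner 'for j in listB: if i == j: listB.remove(i); break'; emptyList.append(i);
-- then emptyList += listB; return len(emptyList)
def findUnionNumber (listA : List Int) (listB : List Int) (n : Int) : Int :=
  let st := listA.foldl
    (fun (st : List Int × List Int) i =>
      let b := if st.2.any (fun j => i == j)
               then (PySem.List.remove? st.2 i).getD st.2
               else st.2
      (st.1 ++ [i], b))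
    (([] : List Int), listB)
  let emptyList := st.1 ++ st.2
  (emptyList.length : Int)

-- ===== PORT B =====
def findUnionNumber_alt (listA : List Int) (listB : List Int) (n : Int) : Int :=
  let ca := listA.foldl (fun d x => d.insert x (d.getD x 0 + 1)) (PySem.Dict.empty : PySem.Dict Int Int)
  let cb := listB.foldl (fun d x => d.insert x (d.getD x 0 + 1)) (PySem.Dict.empty : PySem.Dict Int Int)
  let overlap := ca.items.foldl (fun acc vc => acc + min vc.2 (cb.getD vc.1 0)) (0 : Int)
  (listA.length : Int) + (listB.length : Int) - overlap

-- ===== PRECONDITION & SPEC =====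
def Spec_findUnionNumber (listA : List Int) (listB : List Int) (n : Int) (out : Int) : Prop := out = findUnionNumber_alt listA listB n
instance (listA : List Int) (listB : List Int) (n : Int) (out : Int) : Decidable (Spec_findUnionNumber listA listB n out) := by unfold Spec_findUnionNumber; infer_instance

-- ===== CLAIM (what is proved, stated in full; the proofs are below) =====
def Claim_equal_findUnionNumber : Prop := ∀ (listA : List Int) (listB : List Int) (n : Int), Dom_findUnionNumber listA listB n → Spec_findUnionNumber listA listB n (findUnionNumber listA listB n)

-- ===== LEMMAS AND PROOFS =====

-- A's per-element step on listB is 'erase the first i if present'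
theorem stepA_eq (b : List Int) (i : Int) :
    (if b.any (fun j => i == j) then (PySem.List.remove? b i).getD b else b)
      = if i ∈ b then b.erase i else b := by
  have hany : (b.any (fun j => i == j)) = decide (i ∈ b) := by
    induction b with
    | nil => simp
    | cons x xs ih =>
        simp only [List.any_cons, List.mem_cons, Bool.decide_or, ih]
        simp [beq_eq_decide]
  rw [hany]
  by_cases h : i ∈ b
  · simp [h, PySem.List.remove?_eq_some_erase b i h]
  · simp [h]

-- the fold of that step computes multiset subtraction
theorem foldl_erase_eq_sub (A B : List Int) :
    ((A.foldl (fun b i => if i ∈ b then b.erase i else b) B : List Int) : Multiset Int)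
      = (B : Multiset Int) - (A : Multiset Int) := by
  induction A generalizing B with
  | nil => simp
  | cons a A ih =>
      rw [List.foldl_cons, ih, ← Multiset.cons_coe, Multiset.sub_cons]
      by_cases h : a ∈ B
      · rw [if_pos h, Multiset.coe_erase]
      · rw [if_neg h, Multiset.erase_of_notMem (by simpa using h)]

-- the accumulator's first component just collects listA
theorem foldlA_fst_snd (A B E : List Int) :
    (A.foldl (fun (st : List Int × List Int) i =>
        (st.1 ++ [i],
         if st.2.any (fun j => i == j) then (PySem.List.remove? st.2 i).getD st.2 else st.2))
      (E, B))
    = (E ++ A, A.foldl (fun b i => if i ∈ b then b.erase i else b) B) := by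
  induction A generalizing B E with
  | nil => simp
  | cons a A ih =>
      simp only [List.foldl_cons]
      rw [stepA_eq, ih]
      simp

-- A's value in closed form
theorem findUnionNumber_eq (A B : List Int) (n : Int) :
    findUnionNumber A B n
      = (A.length : Int) + ((Multiset.card ((B : Multiset Int) - (A : Multiset Int))) : Int) := by
  show ((((A.foldl (fun (st : List Int × List Int) i =>
        (st.1 ++ [i],
         if st.2.any (fun j => i == j) then (PySem.List.remove? st.2 i).getD st.2 else st.2))
      (([] : List Int), B)).1 ++ (A.foldl _ (([] : List Int), B)).2).length : Nat) : Int) = _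
  rw [foldlA_fst_snd]
  have h : (A.foldl (fun b i => if i ∈ b then b.erase i else b) B).length
      = Multiset.card ((B : Multiset Int) - (A : Multiset Int)) := by
    rw [← foldl_erase_eq_sub A B, Multiset.coe_card]
  rw [List.nil_append, List.length_append, h]
  push_cast
  ring

-- B's overlap in closed form: a sum of mins over the distinct elements of listA
theorem overlap_eq (A B : List Int) :
    ((PySem.Dict.counter A).items.foldl
        (fun acc vc => acc + min vc.2 ((PySem.Dict.counter B).getD vc.1 0)) (0 : Int))
      = ((PySem.Set.ofList A : List Int).map
          (fun k => ((min (List.count k A) (List.count k B) : Nat) : Int))).sum := by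
  rw [PySem.Dict.items_counter, PySem.List.foldl_add (g := fun vc : Int × Int => min vc.2 ((PySem.Dict.counter B).getD vc.1 0))]
  simp [List.map_map, Function.comp_def, PySem.Dict.getD_counter, Nat.cast_min]

-- the sum of mins is the cardinality of the multiset intersection
theorem sum_min_eq_inter_card (A B : List Int) :
    ((PySem.Set.ofList A : List Int).map
        (fun k => ((min (List.count k A) (List.count k B) : Nat) : Int))).sum
      = ((Multiset.card ((B : Multiset Int) ∩ (A : Multiset Int))) : Int) := by
  have hnd : (PySem.Set.ofList A : List Int).Nodup := PySem.Set.nodup_ofList A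
  have hset : (PySem.Set.ofList A : List Int).toFinset = A.toFinset := by
    apply Finset.ext; intro k
    simp [List.mem_toFinset, PySem.Set.mem_ofList]
  have hsum :
      ((PySem.Set.ofList A : List Int).map
        (fun k => ((min (List.count k A) (List.count k B) : Nat) : Int))).sum
      = ∑ k ∈ A.toFinset, ((min (List.count k A) (List.count k B) : Nat) : Int) := by
    rw [← hset, ← List.sum_toFinset _ hnd]
  have hsub' : ((B : Multiset Int) ∩ (A : Multiset Int)).toFinset ⊆ A.toFinset := by
    intro k hk
    have h1 : k ∈ (B : Multiset Int) ∩ (A : Multiset Int) := Multiset.mem_toFinset.mp hk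
    have h2 : k ∈ (A : Multiset Int) := Multiset.mem_of_le Multiset.inter_le_right h1
    exact List.mem_toFinset.mpr (by simpa using h2)
  have hvanish : ∀ k ∈ A.toFinset, k ∉ ((B : Multiset Int) ∩ (A : Multiset Int)).toFinset →
      Multiset.count k ((B : Multiset Int) ∩ (A : Multiset Int)) = 0 := by
    intro k _ hk
    exact Multiset.count_eq_zero.mpr (fun h => hk (Multiset.mem_toFinset.mpr h))
  have hcard : Multiset.card ((B : Multiset Int) ∩ (A : Multiset Int))
      = ∑ k ∈ A.toFinset, min (List.count k B) (List.count k A) := by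
    rw [← Multiset.toFinset_sum_count_eq ((B : Multiset Int) ∩ (A : Multiset Int)),
        Finset.sum_subset hsub' hvanish]
    exact Finset.sum_congr rfl (fun k _ => by simp)
  rw [hsum, hcard]
  push_cast
  exact Finset.sum_congr rfl (fun k _ => by rw [min_comm])

-- ===== VERDICT (by name: the statement is the Claim_ definition above) =====
theorem findUnionNumber_spec : Claim_equal_findUnionNumber := by
  intro A B n _
  show findUnionNumber A B n = findUnionNumber_alt A B n
  rw [findUnionNumber_eq]
  show _ = (A.length : Int) + (B.length : Int)
      - ((PySem.Dict.counter A).items.foldl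
          (fun acc vc => acc + min vc.2 ((PySem.Dict.counter B).getD vc.1 0)) (0 : Int))
  rw [overlap_eq, sum_min_eq_inter_card]
  have hle : Multiset.card ((B : Multiset Int) ∩ (A : Multiset Int))
      ≤ Multiset.card (B : Multiset Int) :=
    Multiset.card_le_card Multiset.inter_le_left
  have hsub : Multiset.card ((B : Multiset Int) - (A : Multiset Int))
      + Multiset.card ((B : Multiset Int) ∩ (A : Multiset Int))
      = Multiset.card (B : Multiset Int) := by
    rw [← Multiset.card_add, Multiset.sub_add_inter]
  have hB : Multiset.card (B : Multiset Int) = B.length := Multiset.coe_card B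
  omega
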